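-- pv_equiv track=rewrite | github.com/TheodoreMontalbano/Advent-Of-Code-TMM | Advent_Of_Code_2024/aoc23.py | get_ans_1
-- ===== SOURCE A (Python) =====
-- def get_ans_1(data):
--     data = format_data(data)
--     rels = {}
--
--     def addToRel(n1, n2):
--         if n1 in rels:
--             rels[n1].add(n2)
--         else:
--             rels[n1] = {n2}
--
--     tset = set()
--     for n1, n2 in data:
--         addToRel(n1, n2)
--         addToRel(n2, n1)
--         if n1[0] == 't':
--             tset.add(n1)
--         if n2[0] == 't':
--             tset.add(n2)
--     threeSets = set()
--     for tEl in tset: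
--         for el in rels[tEl]:
--             for third in rels[el]:
--                 if third in rels[tEl]:
--                     triple = [tEl, el, third]
--                     triple.sort()
--                     threeSets.add(tuple(triple))
--     return len(threeSets)
--
-- def format_data(data):
--     data = data.split('\n')
--     ret = []
--     for row in data:
--         curr = row.split('-')
--         curr.sort()
--         ret.append(curr)
--     return ret
-- ===== SOURCE B (Python) =====
-- def get_ans_1(data):
--     adj = {}
--     for row in data.split('\n'):
--         a, b = row.split('-')
--         adj.setdefault(a, set()).add(b)
--         adj.setdefault(b, set()).add(a)
--     nodes = sorted(adj)
--     t_nodes = {x for x in nodes if x[0] == 't'}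
--     n = len(nodes)
--     count = 0
--     for i in range(n):
--         a = nodes[i]
--         for j in range(i, n):
--             b = nodes[j]
--             if b in adj[a]:
--                 for k in range(j, n):
--                     c = nodes[k]
--                     if c in adj[a] and c in adj[b] and (a in t_nodes or b in t_nodes or c in t_nodes):
--                         count += 1
--     return count
-- ===== Notes on version B (the rewrite author's own statement) =====
-- stated objective: idiomatic
-- what changed: A builds a set of sorted triples by walking, for each 't'-node, neighbours and neighbours-of-neighbours and finally returns the set's size; B never deduplicates: it sorts the node list once and counts ordered index triples i<=j<=k whose three nodes are mutually adjacent and include a 't'-node, so each triangle is counted exactly once by construction.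
import Mathlib
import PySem

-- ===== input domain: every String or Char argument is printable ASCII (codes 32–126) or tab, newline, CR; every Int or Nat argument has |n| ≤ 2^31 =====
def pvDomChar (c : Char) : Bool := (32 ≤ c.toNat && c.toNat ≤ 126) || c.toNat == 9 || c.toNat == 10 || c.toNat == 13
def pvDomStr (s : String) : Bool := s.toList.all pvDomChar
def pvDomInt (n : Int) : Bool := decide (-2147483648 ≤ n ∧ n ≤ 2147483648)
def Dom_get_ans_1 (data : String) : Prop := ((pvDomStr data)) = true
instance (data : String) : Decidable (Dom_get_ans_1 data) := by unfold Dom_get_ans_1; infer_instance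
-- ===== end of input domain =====

-- B replaces A's dedup-set of sorted triples by a single ordered scan over index triples
-- i ≤ j ≤ k of the sorted node list (each triangle counted once by construction); same return value.

-- s.split(sep) for a non-empty sep (both Pythons call it with '\n' and '-')
def pvSplit (s sep : String) : List String := (PySem.Str.split? s sep).getD []

-- x[0] == 't'  (on the empty string Python raises IndexError; such inputs are outside Pre_)
def pvIsT (x : String) : Bool := PySem.Str.pyGet? x 0 == some 't'


-- ===== PORT A =====
def pvAddRel (rels : PySem.Dict String (PySem.Set String)) (n1 n2 : String) :
    PySem.Dict String (PySem.Set String) :=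
  if rels.contains n1 then rels.modify n1 PySem.Set.empty (fun s => PySem.Set.add s n2)
  else rels.insert n1 (PySem.Set.add PySem.Set.empty n2)

def pvFormatData (data : String) : List (List String) :=
  (pvSplit data "\n").map (fun row => PySem.List.sorted (pvSplit row "-") (fun x => x))

def pvStepA (st : PySem.Dict String (PySem.Set String) × PySem.Set String) (row : List String) :
    PySem.Dict String (PySem.Set String) × PySem.Set String :=
  match row with
  | [n1, n2] =>
      let rels := pvAddRel (pvAddRel st.1 n1 n2) n2 n1
      let ts := if pvIsT n1 then PySem.Set.add st.2 n1 else st.2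
      let ts := if pvIsT n2 then PySem.Set.add ts n2 else ts
      (rels, ts)
  | _ => st   -- Python raises ValueError unpacking such a row; outside Pre_

-- the iteration below runs over Python sets; only the final SIZE of threeSets is returned,
-- which does not depend on the iteration order.  rels[...] is read with default ∅ (getD):
-- under Pre_ every key that is looked up is present, so this equals Python's rels[...].
def get_ans_1 (data : String) : Int :=
  let st := (pvFormatData data).foldl pvStepA (PySem.Dict.empty, PySem.Set.empty)
  let rels := st.1
  let threeSets := st.2.foldl (fun acc tEl =>
    (rels.getD tEl PySem.Set.empty).foldl (fun acc el =>
      (rels.getD el PySem.Set.empty).foldl (fun acc third =>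
        if PySem.Set.contains (rels.getD tEl PySem.Set.empty) third then
          PySem.Set.add acc (PySem.List.sorted [tEl, el, third] (fun x => x))
        else acc) acc) acc) PySem.Set.empty
  (threeSets.length : Int)

-- ===== PORT B =====
def pvStepB (d : PySem.Dict String (PySem.Set String)) (row : String) :
    PySem.Dict String (PySem.Set String) :=
  match pvSplit row "-" with
  | [a, b] =>
      (d.modify a PySem.Set.empty (fun s => PySem.Set.add s b)).modify b PySem.Set.empty
        (fun s => PySem.Set.add s a)
  | _ => d   -- Python raises ValueError unpacking such a row; outside Pre_

def get_ans_1_alt (data : String) : Int :=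
  let adj := (pvSplit data "\n").foldl pvStepB PySem.Dict.empty
  let nodes := PySem.List.sorted adj.keys (fun x => x)
  -- {x for x in nodes if x[0] == 't'}: only MEMBERSHIP in this set is used below,
  -- so the set-comprehension's iteration order is immaterial
  let tNodes := PySem.Set.ofList (nodes.filter (fun x => pvIsT x))
  let n : Int := nodes.length
  (PySem.List.pyRange 0 n).foldl (fun cnt i =>
    let a := PySem.List.pyGetD nodes i ""
    (PySem.List.pyRange i n).foldl (fun cnt j =>
      let b := PySem.List.pyGetD nodes j ""
      if PySem.Set.contains (adj.getD a PySem.Set.empty) b then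
        (PySem.List.pyRange j n).foldl (fun cnt k =>
          let c := PySem.List.pyGetD nodes k ""
          if PySem.Set.contains (adj.getD a PySem.Set.empty) c &&
             PySem.Set.contains (adj.getD b PySem.Set.empty) c &&
             (PySem.Set.contains tNodes a || PySem.Set.contains tNodes b ||
              PySem.Set.contains tNodes c)
          then cnt + 1 else cnt) cnt
      else cnt) cnt) 0

-- ===== PRECONDITION & SPEC =====
-- Pre_ = exactly the inputs where Python A returns: every line must split on '-' into exactly
-- two NONEMPTY parts (otherwise A raises ValueError on unpacking, or IndexError on n1[0]).
def Pre_get_ans_1 (data : String) : Prop :=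
  ∀ line ∈ pvSplit data "\n",
    (pvSplit line "-").length = 2 ∧ ∀ p ∈ pvSplit line "-", p ≠ ""
instance (data : String) : Decidable (Pre_get_ans_1 data) := by unfold Pre_get_ans_1; infer_instance

def pvWitness_get_ans_1 : String := "ta-b\nb-c\nc-ta"

def Spec_get_ans_1 (data : String) (out : Int) : Prop := out = get_ans_1_alt data
instance (data : String) (out : Int) : Decidable (Spec_get_ans_1 data out) := by
  unfold Spec_get_ans_1; infer_instance

-- ===== CLAIM (what is proved, stated in full; the proofs are below) =====
def Claim_equal_get_ans_1 : Prop :=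
  ∀ (data : String), Dom_get_ans_1 data → Pre_get_ans_1 data →
    Spec_get_ans_1 data (get_ans_1 data)

-- ===== LEMMAS AND PROOFS =====

-- the symmetric edge relation both programs extract from the input
def pvE (data x y : String) : Prop :=
  ∃ l ∈ pvSplit data "\n", ∃ u v, pvSplit l "-" = [u, v] ∧
    ((x = u ∧ y = v) ∨ (x = v ∧ y = u))

lemma pvE_symm (data x y : String) : pvE data x y ↔ pvE data y x := by
  unfold pvE; constructor <;> (rintro ⟨l, hl, u, v, hp, h⟩; exact ⟨l, hl, u, v, hp, by tauto⟩)

-- generic membership through a conditional-insert fold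
lemma mem_foldl_iff {β γ : Type} (l : List β) (f : List γ → β → List γ) (P : β → γ → Prop)
    (hf : ∀ s b t, t ∈ f s b ↔ t ∈ s ∨ P b t) :
    ∀ (s : List γ) (t : γ), t ∈ l.foldl f s ↔ t ∈ s ∨ ∃ b ∈ l, P b t := by
  induction l with
  | nil => simp
  | cons b l ih => intro s t; rw [List.foldl_cons, ih, hf]; simp; tauto

lemma nodup_foldl {β γ : Type} (l : List β) (f : List γ → β → List γ)
    (hf : ∀ s b, s.Nodup → (f s b).Nodup) :
    ∀ s : List γ, s.Nodup → (l.foldl f s).Nodup := by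
  induction l with
  | nil => simp
  | cons b l ih => intro s hs; exact ih _ (hf _ _ hs)

lemma pvAddRel_getD (rels : PySem.Dict String (PySem.Set String)) (n1 n2 x : String) :
    (pvAddRel rels n1 n2).getD x PySem.Set.empty =
      if x = n1 then PySem.Set.add (rels.getD n1 PySem.Set.empty) n2
      else rels.getD x PySem.Set.empty := by
  unfold pvAddRel
  by_cases h : rels.contains n1
  · simp [h, PySem.Dict.getD_modify]
  · simp only [Bool.not_eq_true] at h
    rw [if_neg (by simp [h]), PySem.Dict.getD_insert]
    split_ifs with hx
    · subst hx; rw [PySem.Dict.getD_of_not_contains _ _ h]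
    · rfl

lemma stepA_adj (d : PySem.Dict String (PySem.Set String)) (t : PySem.Set String)
    (u v x y : String) :
    y ∈ (pvStepA (d, t) [u, v]).1.getD x PySem.Set.empty ↔
      y ∈ d.getD x PySem.Set.empty ∨ (x = u ∧ y = v) ∨ (x = v ∧ y = u) := by
  show y ∈ (pvAddRel (pvAddRel d u v) v u).getD x PySem.Set.empty ↔ _
  simp only [pvAddRel_getD]
  split_ifs with h1 h2 h3 <;> subst_eqs <;> simp [PySem.Set.mem_add] <;> tauto

lemma stepA_tset (d : PySem.Dict String (PySem.Set String)) (t : PySem.Set String)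
    (u v z : String) :
    z ∈ (pvStepA (d, t) [u, v]).2 ↔
      z ∈ t ∨ (z = u ∨ z = v) ∧ pvIsT z = true := by
  show z ∈ (if pvIsT v then PySem.Set.add (if pvIsT u then PySem.Set.add t u else t) v
            else (if pvIsT u then PySem.Set.add t u else t)) ↔ _
  split_ifs with h1 h2 h3 <;> (try simp only [PySem.Set.mem_add]) <;>
    (constructor <;> intro h) <;>
    first
    | tauto
    | (rcases h with h | ⟨(rfl | rfl), ht⟩ <;> simp_all)
    | (rcases h with (h | rfl) | rfl <;> simp_all)

lemma foldA_adj (rows : List (List String)) (h2 : ∀ r ∈ rows, ∃ u v, r = [u, v]) :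
    ∀ (d : PySem.Dict String (PySem.Set String)) (t : PySem.Set String) (x y : String),
      y ∈ (rows.foldl pvStepA (d, t)).1.getD x PySem.Set.empty ↔
        y ∈ d.getD x PySem.Set.empty ∨
          ∃ u v, [u, v] ∈ rows ∧ ((x = u ∧ y = v) ∨ (x = v ∧ y = u)) := by
  induction rows with
  | nil => simp
  | cons r rows ih =>
    obtain ⟨u, v, rfl⟩ := h2 _ (List.mem_cons_self ..)
    intro d t x y
    rw [List.foldl_cons, ← Prod.mk.eta (p := pvStepA (d, t) [u, v]),
      ih (fun r hr => h2 r (List.mem_cons_of_mem _ hr)), stepA_adj]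
    simp only [List.mem_cons, List.cons.injEq]
    constructor
    · rintro ((h | h | h) | ⟨u', v', hm, hc⟩)
      · exact .inl h
      · exact .inr ⟨u, v, .inl ⟨rfl, rfl, trivial⟩, .inl h⟩
      · exact .inr ⟨u, v, .inl ⟨rfl, rfl, trivial⟩, .inr h⟩
      · exact .inr ⟨u', v', .inr hm, hc⟩
    · rintro (h | ⟨u', v', (⟨rfl, rfl, -⟩ | hm), hc⟩)
      · exact .inl (.inl h)
      · exact .inl (.inr hc)
      · exact .inr ⟨u', v', hm, hc⟩

lemma foldA_tset (rows : List (List String)) (h2 : ∀ r ∈ rows, ∃ u v, r = [u, v]) :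
    ∀ (d : PySem.Dict String (PySem.Set String)) (t : PySem.Set String) (z : String),
      z ∈ (rows.foldl pvStepA (d, t)).2 ↔
        z ∈ t ∨ ∃ u v, [u, v] ∈ rows ∧ (z = u ∨ z = v) ∧ pvIsT z = true := by
  induction rows with
  | nil => simp
  | cons r rows ih =>
    obtain ⟨u, v, rfl⟩ := h2 _ (List.mem_cons_self ..)
    intro d t z
    rw [List.foldl_cons, ← Prod.mk.eta (p := pvStepA (d, t) [u, v]),
      ih (fun r hr => h2 r (List.mem_cons_of_mem _ hr)), stepA_tset]
    simp only [List.mem_cons, List.cons.injEq]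
    constructor
    · rintro ((h | h) | ⟨u', v', hm, hc⟩)
      · exact .inl h
      · exact .inr ⟨u, v, .inl ⟨rfl, rfl, trivial⟩, h⟩
      · exact .inr ⟨u', v', .inr hm, hc⟩
    · rintro (h | ⟨u', v', (⟨rfl, rfl, -⟩ | hm), hc⟩)
      · exact .inl (.inl h)
      · exact .inl (.inr hc)
      · exact .inr ⟨u', v', hm, hc⟩

lemma sorted_pair (u v : String) :
    PySem.List.sorted [u, v] (fun x => x) = [u, v] ∨
    PySem.List.sorted [u, v] (fun x => x) = [v, u] := by
  rcases le_total u v with h | h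
  · exact .inl (PySem.List.sorted_id_eq_of_perm_of_pairwise _ _ (List.Perm.refl _)
      (by simp [String.le_iff_toList_le.mp h]))
  · exact .inr (PySem.List.sorted_id_eq_of_perm_of_pairwise _ _ (List.Perm.swap u v [])
      (by simp [String.le_iff_toList_le.mp h]))

lemma rows_shape (data : String) (hPre : Pre_get_ans_1 data) :
    ∀ r ∈ pvFormatData data, ∃ u v, r = [u, v] := by
  intro r hr
  obtain ⟨l, hl, rfl⟩ := List.mem_map.1 hr
  have h2 := (hPre l hl).1
  have : (PySem.List.sorted (pvSplit l "-") (fun x => x)).length = 2 := by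
    rw [PySem.List.length_sorted]; exact h2
  obtain ⟨u, v, h⟩ := List.length_eq_two.1 this
  exact ⟨u, v, h⟩

lemma rows_pairs (data : String) (hPre : Pre_get_ans_1 data) (x y : String) :
    (∃ u v, [u, v] ∈ pvFormatData data ∧ ((x = u ∧ y = v) ∨ (x = v ∧ y = u))) ↔
      pvE data x y := by
  constructor
  · rintro ⟨u, v, hm, hc⟩
    obtain ⟨l, hl, hs⟩ := List.mem_map.1 hm
    obtain ⟨p, q, hpq⟩ := List.length_eq_two.1 (hPre l hl).1
    rw [hpq] at hs
    rcases sorted_pair p q with h | h <;> rw [h] at hs <;>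
      obtain ⟨rfl, rfl⟩ : _ ∧ _ := by simpa using hs.symm
    · exact ⟨l, hl, _, _, hpq, by tauto⟩
    · exact ⟨l, hl, _, _, hpq, by tauto⟩
  · rintro ⟨l, hl, u, v, hp, hc⟩
    have hm : PySem.List.sorted (pvSplit l "-") (fun x => x) ∈ pvFormatData data :=
      List.mem_map_of_mem hl
    rw [hp] at hm
    rcases sorted_pair u v with h | h <;> rw [h] at hm
    · exact ⟨u, v, hm, hc⟩
    · exact ⟨v, u, hm, by tauto⟩

lemma stepB_adj (d : PySem.Dict String (PySem.Set String)) (row : String) (u v : String)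
    (hp : pvSplit row "-" = [u, v]) (x y : String) :
    y ∈ (pvStepB d row).getD x PySem.Set.empty ↔
      y ∈ d.getD x PySem.Set.empty ∨ (x = u ∧ y = v) ∨ (x = v ∧ y = u) := by
  unfold pvStepB
  rw [hp]
  simp only [PySem.Dict.getD_modify]
  split_ifs with h1 h2 <;> subst_eqs <;> simp [PySem.Set.mem_add] <;> tauto

lemma stepB_keys (d : PySem.Dict String (PySem.Set String)) (row : String) (u v : String)
    (hp : pvSplit row "-" = [u, v]) (x : String) :
    x ∈ (pvStepB d row).keys ↔ x = u ∨ x = v ∨ x ∈ d.keys := by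
  unfold pvStepB
  rw [hp]
  simp only [PySem.Dict.keys_modify, PySem.Dict.mem_keys_insert]
  tauto

lemma stepB_keys_nodup (d : PySem.Dict String (PySem.Set String)) (row : String)
    (h : d.keys.Nodup) : (pvStepB d row).keys.Nodup := by
  unfold pvStepB
  split
  · rw [PySem.Dict.keys_modify]
    apply PySem.Dict.nodup_keys_insert
    rw [PySem.Dict.keys_modify]
    exact PySem.Dict.nodup_keys_insert _ _ _ h
  · exact h

lemma foldB_adj (lines : List String) (h2 : ∀ l ∈ lines, ∃ u v, pvSplit l "-" = [u, v]) :
    ∀ (d : PySem.Dict String (PySem.Set String)) (x y : String),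
      y ∈ (lines.foldl pvStepB d).getD x PySem.Set.empty ↔
        y ∈ d.getD x PySem.Set.empty ∨
          ∃ l ∈ lines, ∃ u v, pvSplit l "-" = [u, v] ∧
            ((x = u ∧ y = v) ∨ (x = v ∧ y = u)) := by
  induction lines with
  | nil => simp
  | cons r lines ih =>
    obtain ⟨u, v, hp⟩ := h2 _ (List.mem_cons_self ..)
    intro d x y
    rw [List.foldl_cons, ih (fun l hl => h2 l (List.mem_cons_of_mem _ hl)),
      stepB_adj d r u v hp]
    simp only [List.mem_cons]
    constructor
    · rintro ((h | h | h) | ⟨l, hl, w, z, hpl, hc⟩)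
      · exact .inl h
      · exact .inr ⟨r, .inl rfl, u, v, hp, .inl h⟩
      · exact .inr ⟨r, .inl rfl, u, v, hp, .inr h⟩
      · exact .inr ⟨l, .inr hl, w, z, hpl, hc⟩
    · rintro (h | ⟨l, (rfl | hl), w, z, hpl, hc⟩)
      · exact .inl (.inl h)
      · rw [hp] at hpl
        obtain ⟨rfl, rfl⟩ : _ ∧ _ := by simpa using hpl.symm
        exact .inl (.inr hc)
      · exact .inr ⟨l, hl, w, z, hpl, hc⟩

lemma foldB_keys (lines : List String) (h2 : ∀ l ∈ lines, ∃ u v, pvSplit l "-" = [u, v]) :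
    ∀ (d : PySem.Dict String (PySem.Set String)) (x : String),
      x ∈ (lines.foldl pvStepB d).keys ↔
        x ∈ d.keys ∨ ∃ l ∈ lines, ∃ u v, pvSplit l "-" = [u, v] ∧ (x = u ∨ x = v) := by
  induction lines with
  | nil => simp
  | cons r lines ih =>
    obtain ⟨u, v, hp⟩ := h2 _ (List.mem_cons_self ..)
    intro d x
    rw [List.foldl_cons, ih (fun l hl => h2 l (List.mem_cons_of_mem _ hl)),
      stepB_keys d r u v hp]
    simp only [List.mem_cons]
    constructor
    · rintro ((h | h | h) | ⟨l, hl, w, z, hpl, hc⟩)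
      · exact .inr ⟨r, .inl rfl, u, v, hp, .inl h⟩
      · exact .inr ⟨r, .inl rfl, u, v, hp, .inr h⟩
      · exact .inl h
      · exact .inr ⟨l, .inr hl, w, z, hpl, hc⟩
    · rintro (h | ⟨l, (rfl | hl), w, z, hpl, hc⟩)
      · exact .inl (.inr (.inr h))
      · rw [hp] at hpl
        obtain ⟨rfl, rfl⟩ : _ ∧ _ := by simpa using hpl.symm
        rcases hc with rfl | rfl
        · exact .inl (.inl rfl)
        · exact .inl (.inr (.inl rfl))
      · exact .inr ⟨l, hl, w, z, hpl, hc⟩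

lemma foldB_keys_nodup (lines : List String) :
    ∀ d : PySem.Dict String (PySem.Set String),
      d.keys.Nodup → (lines.foldl pvStepB d).keys.Nodup := by
  induction lines with
  | nil => intro d h; simpa using h
  | cons r lines ih => intro d h; exact ih _ (stepB_keys_nodup _ _ h)

def pvGuard (adj : PySem.Dict String (PySem.Set String)) (nodes : List String) (i j : Int) : Bool :=
  PySem.Set.contains (adj.getD (PySem.List.pyGetD nodes i "") PySem.Set.empty)
    (PySem.List.pyGetD nodes j "")
def pvCond (adj : PySem.Dict String (PySem.Set String)) (nodes : List String)
    (tns : PySem.Set String) (i j k : Int) : Bool :=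
  PySem.Set.contains (adj.getD (PySem.List.pyGetD nodes i "") PySem.Set.empty)
      (PySem.List.pyGetD nodes k "") &&
  PySem.Set.contains (adj.getD (PySem.List.pyGetD nodes j "") PySem.Set.empty)
      (PySem.List.pyGetD nodes k "") &&
  (PySem.Set.contains tns (PySem.List.pyGetD nodes i "") ||
   PySem.Set.contains tns (PySem.List.pyGetD nodes j "") ||
   PySem.Set.contains tns (PySem.List.pyGetD nodes k ""))
def pvIDX (n : Int) : List (Int × Int × Int) :=
  (PySem.List.pyRange 0 n).flatMap fun i =>
    (PySem.List.pyRange i n).flatMap fun j =>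
      (PySem.List.pyRange j n).map fun k => (i, j, k)
def pvFull (adj : PySem.Dict String (PySem.Set String)) (nodes : List String)
    (tns : PySem.Set String) (p : Int × Int × Int) : Bool :=
  pvGuard adj nodes p.1 p.2.1 && pvCond adj nodes tns p.1 p.2.1 p.2.2

lemma countB_fold (adj : PySem.Dict String (PySem.Set String)) (nodes : List String)
    (tns : PySem.Set String) :
    ((PySem.List.pyRange 0 (nodes.length : Int)).foldl (fun cnt i =>
      (PySem.List.pyRange i (nodes.length : Int)).foldl (fun cnt j =>
        if pvGuard adj nodes i j then
          (PySem.List.pyRange j (nodes.length : Int)).foldl (fun cnt k =>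
            if pvCond adj nodes tns i j k then cnt + 1 else cnt) cnt
        else cnt) cnt) 0 : Int)
    = (((pvIDX (nodes.length : Int)).filter (pvFull adj nodes tns)).length : Int) := by
  set n : Int := (nodes.length : Int) with hn
  have hmid : ∀ (i : Int) (cnt : Int),
      (PySem.List.pyRange i n).foldl (fun cnt j =>
        if pvGuard adj nodes i j then
          (PySem.List.pyRange j n).foldl (fun cnt k =>
            if pvCond adj nodes tns i j k then cnt + 1 else cnt) cnt
        else cnt) cnt
      = cnt + ((PySem.List.pyRange i n).map (fun j =>
          if pvGuard adj nodes i j then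
            (((PySem.List.pyRange j n).countP (pvCond adj nodes tns i j)) : Int) else 0)).sum := by
    intro i cnt
    rw [PySem.List.foldl_congr_mem (g := fun cnt j =>
      cnt + (if pvGuard adj nodes i j then
        (((PySem.List.pyRange j n).countP (pvCond adj nodes tns i j)) : Int) else 0))]
    · exact PySem.List.foldl_add _ _ _
    · intro acc j _
      rw [PySem.List.foldl_if_add_one]
      split_ifs <;> simp
  rw [PySem.List.foldl_congr_mem (g := fun cnt i =>
    cnt + ((PySem.List.pyRange i n).map (fun j =>
      if pvGuard adj nodes i j then
        (((PySem.List.pyRange j n).countP (pvCond adj nodes tns i j)) : Int) else 0)).sum)]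
  · rw [PySem.List.foldl_add, ← List.countP_eq_length_filter]
    unfold pvIDX
    rw [List.countP_flatMap, Nat.cast_list_sum, List.map_map, zero_add]
    refine congrArg List.sum (List.map_congr_left fun i _ => ?_)
    simp only [Function.comp_apply]
    rw [List.countP_flatMap, Nat.cast_list_sum, List.map_map]
    refine congrArg List.sum (List.map_congr_left fun j _ => ?_)
    simp only [Function.comp_apply]
    rw [List.countP_map]
    by_cases hg : pvGuard adj nodes i j = true
    · simp only [hg, if_true]
      refine congrArg Nat.cast (List.countP_congr fun k _ => ?_)
      simp only [Function.comp_apply]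
      unfold pvFull
      simp [hg]
    · simp only [hg]
      rw [show (List.countP ((pvFull adj nodes tns) ∘ fun k => (i, j, k))
        (PySem.List.pyRange j n)) = 0 from List.countP_eq_zero.2 (by
          intro k hk
          simp only [Function.comp_apply]
          unfold pvFull
          simp [hg])]
      simp
  · intro acc i _
    exact hmid i acc

lemma mem_pvIDX (n : Int) (p : Int × Int × Int) :
    p ∈ pvIDX n ↔ 0 ≤ p.1 ∧ p.1 ≤ p.2.1 ∧ p.2.1 ≤ p.2.2 ∧ p.2.2 < n := by
  obtain ⟨i, j, k⟩ := p
  simp only [pvIDX, List.mem_flatMap, List.mem_map, PySem.List.mem_pyRange_one]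
  constructor
  · rintro ⟨i', ⟨hi1, hi2⟩, j', ⟨hj1, hj2⟩, k', ⟨hk1, hk2⟩, h⟩
    obtain ⟨rfl, rfl, rfl⟩ : i' = i ∧ j' = j ∧ k' = k := by
      simpa [Prod.ext_iff] using h
    exact ⟨hi1, hj1, hk1, hk2⟩
  · rintro ⟨h1, h2, h3, h4⟩
    exact ⟨i, ⟨h1, by omega⟩, j, ⟨h2, by omega⟩, k, ⟨h3, h4⟩, rfl⟩

lemma nodup_pvIDX (n : Int) : (pvIDX n).Nodup := by
  unfold pvIDX
  rw [List.nodup_flatMap]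
  refine ⟨fun i _ => ?_, ?_⟩
  · rw [List.nodup_flatMap]
    refine ⟨fun j _ => ?_, ?_⟩
    · exact (PySem.List.nodup_pyRange_one _ _).map
        (fun k k' h => by simpa [Prod.ext_iff] using h)
    · refine List.Pairwise.imp ?_ (PySem.List.pairwise_lt_pyRange_one _ _)
      intro j j' hlt q hq hq'
      simp only [List.mem_map] at hq hq'
      obtain ⟨k, -, rfl⟩ := hq
      obtain ⟨k', -, h⟩ := hq'
      obtain ⟨h2, -⟩ : j' = j ∧ k' = k := by simpa [Prod.ext_iff] using h
      omega
  · refine List.Pairwise.imp ?_ (PySem.List.pairwise_lt_pyRange_one _ _)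
    intro i i' hlt q hq hq'
    simp only [List.mem_flatMap, List.mem_map] at hq hq'
    obtain ⟨j, -, k, -, rfl⟩ := hq
    obtain ⟨j', -, k', -, h⟩ := hq'
    obtain ⟨h1, -⟩ : i' = i ∧ j' = j ∧ k' = k := by simpa [Prod.ext_iff] using h
    omega

-- proof-side names for the structures the two ports build
def pvStA (data : String) : PySem.Dict String (PySem.Set String) × PySem.Set String :=
  (pvFormatData data).foldl pvStepA (PySem.Dict.empty, PySem.Set.empty)

def pvThree (data : String) : PySem.Set (List String) :=
  (pvStA data).2.foldl (fun acc tEl =>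
    ((pvStA data).1.getD tEl PySem.Set.empty).foldl (fun acc el =>
      ((pvStA data).1.getD el PySem.Set.empty).foldl (fun acc third =>
        if PySem.Set.contains ((pvStA data).1.getD tEl PySem.Set.empty) third then
          PySem.Set.add acc (PySem.List.sorted [tEl, el, third] (fun x => x))
        else acc) acc) acc) PySem.Set.empty

lemma get_ans_1_eq (data : String) : get_ans_1 data = ((pvThree data).length : Int) := rfl

def pvAdjB (data : String) : PySem.Dict String (PySem.Set String) :=
  (pvSplit data "\n").foldl pvStepB PySem.Dict.empty

def pvNodes (data : String) : List String :=
  PySem.List.sorted (pvAdjB data).keys (fun x => x)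

def pvTNodes (data : String) : PySem.Set String :=
  PySem.Set.ofList ((pvNodes data).filter (fun x => pvIsT x))

lemma get_ans_1_alt_eq (data : String) :
    get_ans_1_alt data =
      (((pvIDX ((pvNodes data).length : Int)).filter
        (pvFull (pvAdjB data) (pvNodes data) (pvTNodes data))).length : Int) := by
  rw [← countB_fold]
  rfl

lemma pre_shape (data : String) (hPre : Pre_get_ans_1 data) :
    ∀ l ∈ pvSplit data "\n", ∃ u v, pvSplit l "-" = [u, v] :=
  fun l hl => List.length_eq_two.1 (hPre l hl).1

lemma adjB_mem (data : String) (hPre : Pre_get_ans_1 data) (x y : String) :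
    y ∈ (pvAdjB data).getD x PySem.Set.empty ↔ pvE data x y := by
  unfold pvAdjB pvE
  rw [foldB_adj _ (pre_shape data hPre)]
  simp [PySem.Dict.getD_empty]

lemma relsA_mem (data : String) (hPre : Pre_get_ans_1 data) (x y : String) :
    y ∈ (pvStA data).1.getD x PySem.Set.empty ↔ pvE data x y := by
  unfold pvStA
  rw [foldA_adj _ (rows_shape data hPre), ← rows_pairs data hPre x y]
  simp [PySem.Dict.getD_empty]

lemma tsetA_mem (data : String) (hPre : Pre_get_ans_1 data) (z : String) :
    z ∈ (pvStA data).2 ↔ (∃ w, pvE data z w) ∧ pvIsT z = true := by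
  unfold pvStA
  rw [foldA_tset _ (rows_shape data hPre)]
  simp only [PySem.Set.empty, List.not_mem_nil, false_or]
  constructor
  · rintro ⟨u, v, hm, hz, ht⟩
    refine ⟨?_, ht⟩
    rcases hz with rfl | rfl
    · exact ⟨v, (rows_pairs data hPre z v).1 ⟨z, v, hm, .inl ⟨rfl, rfl⟩⟩⟩
    · exact ⟨u, (rows_pairs data hPre z u).1 ⟨u, z, hm, .inr ⟨rfl, rfl⟩⟩⟩
  · rintro ⟨⟨w, hw⟩, ht⟩
    obtain ⟨u, v, hm, hc⟩ := (rows_pairs data hPre z w).2 hw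
    exact ⟨u, v, hm, by tauto, ht⟩

lemma nodes_mem (data : String) (hPre : Pre_get_ans_1 data) (x : String) :
    x ∈ pvNodes data ↔ ∃ w, pvE data x w := by
  unfold pvNodes pvAdjB
  rw [PySem.List.mem_sorted, foldB_keys _ (pre_shape data hPre)]
  simp only [PySem.Dict.keys_empty, List.not_mem_nil, false_or]
  constructor
  · rintro ⟨l, hl, u, v, hp, hx⟩
    rcases hx with rfl | rfl
    · exact ⟨v, l, hl, x, v, hp, .inl ⟨rfl, rfl⟩⟩
    · exact ⟨u, l, hl, u, x, hp, .inr ⟨rfl, rfl⟩⟩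
  · rintro ⟨w, l, hl, u, v, hp, hc⟩
    exact ⟨l, hl, u, v, hp, by tauto⟩

lemma nodes_nodup (data : String) : (pvNodes data).Nodup := by
  unfold pvNodes
  rw [(PySem.List.sorted_perm _ _ _).nodup_iff]
  exact foldB_keys_nodup _ _ (by simp [PySem.Dict.keys_empty])

lemma nodes_lt (data : String) : (pvNodes data).Pairwise (· < ·) := by
  have h1 := PySem.List.sorted_pairwise (pvAdjB data).keys (fun x => x)
  have h2 := nodes_nodup data
  exact (h1.and h2).imp (fun h => lt_of_le_of_ne h.1 h.2)

-- what A's threeSets contains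
def pvPredA (data : String) (t : List String) : Prop :=
  ∃ a b c, pvIsT a = true ∧ pvE data a b ∧ pvE data b c ∧ pvE data a c ∧
    t = PySem.List.sorted [a, b, c] (fun x => x)

lemma threeSets_mem (data : String) (hPre : Pre_get_ans_1 data) (t : List String) :
    t ∈ pvThree data ↔ pvPredA data t := by
  unfold pvThree
  rw [mem_foldl_iff _ _ (fun tEl t => ∃ el ∈ (pvStA data).1.getD tEl PySem.Set.empty,
      ∃ third ∈ (pvStA data).1.getD el PySem.Set.empty,
        third ∈ (pvStA data).1.getD tEl PySem.Set.empty ∧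
        t = PySem.List.sorted [tEl, el, third] (fun x => x))]
  · simp only [PySem.Set.empty, List.not_mem_nil, false_or]
    constructor
    · rintro ⟨a, ha, b, hb, c, hc, hcont, rfl⟩
      exact ⟨a, b, c, ((tsetA_mem data hPre a).1 ha).2,
        (relsA_mem data hPre a b).1 hb, (relsA_mem data hPre b c).1 hc,
        (relsA_mem data hPre a c).1 hcont, rfl⟩
    · rintro ⟨a, b, c, ht, hab, hbc, hac, rfl⟩
      exact ⟨a, (tsetA_mem data hPre a).2 ⟨⟨b, hab⟩, ht⟩,
        b, (relsA_mem data hPre a b).2 hab,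
        c, (relsA_mem data hPre b c).2 hbc,
        (relsA_mem data hPre a c).2 hac, rfl⟩
  · intro s tEl t
    rw [mem_foldl_iff _ _ (fun el t => ∃ third ∈ (pvStA data).1.getD el PySem.Set.empty,
        third ∈ (pvStA data).1.getD tEl PySem.Set.empty ∧
        t = PySem.List.sorted [tEl, el, third] (fun x => x))]
    intro s el t
    rw [mem_foldl_iff _ _ (fun third t =>
        third ∈ (pvStA data).1.getD tEl PySem.Set.empty ∧
        t = PySem.List.sorted [tEl, el, third] (fun x => x))]
    intro s third t
    split_ifs with h
    · have hmem := (PySem.Set.contains_iff _ _).1 h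
      simp only [PySem.Set.empty] at hmem ⊢
      simp [PySem.Set.mem_add, hmem]
    · have hm : third ∉ (pvStA data).1.getD tEl PySem.Set.empty :=
        fun hm => h ((PySem.Set.contains_iff _ _).2 hm)
      simp only [PySem.Set.empty] at hm ⊢
      simp [hm]

lemma threeSets_nodup (data : String) : (pvThree data).Nodup := by
  unfold pvThree
  refine nodup_foldl _ _ (fun s tEl hs => ?_) _ List.nodup_nil
  refine nodup_foldl _ _ (fun s el hs => ?_) _ hs
  refine nodup_foldl _ _ (fun s third hs => ?_) _ hs
  split_ifs with h
  · exact PySem.Set.nodup_add _ _ hs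
  · exact hs

def pvTriple (nodes : List String) (p : Int × Int × Int) : List String :=
  [PySem.List.pyGetD nodes p.1 "", PySem.List.pyGetD nodes p.2.1 "",
   PySem.List.pyGetD nodes p.2.2 ""]

lemma pyGetD_at (nodes : List String) {i : Int} (h0 : 0 ≤ i) (h1 : i < (nodes.length : Int)) :
    PySem.List.pyGetD nodes i "" = nodes[i.toNat]'(by omega) := by
  rw [PySem.List.pyGetD_of_nonneg _ _ h0, List.getD_eq_getElem _ _ (by omega)]

lemma idx_le (nodes : List String) (hlt : nodes.Pairwise (· < ·)) {p q : Nat}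
    (hp : p < nodes.length) (hq : q < nodes.length) (h : nodes[p] ≤ nodes[q]) : p ≤ q := by
  by_contra h'
  exact absurd h (not_le.2 (List.pairwise_iff_getElem.1 hlt q p hq hp (by omega)))

lemma getElem_mono (nodes : List String) (hlt : nodes.Pairwise (· < ·)) {p q : Nat}
    (hp : p < nodes.length) (hq : q < nodes.length) (h : p ≤ q) : nodes[p] ≤ nodes[q] := by
  rcases Nat.lt_or_ge p q with h' | h'
  · exact le_of_lt (List.pairwise_iff_getElem.1 hlt p q hp hq h')
  · have : p = q := by omega
    subst this; rfl

-- B's boolean test, read through the characterizations, at Nat indices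
set_option maxHeartbeats 1000000 in
lemma full_iff (data : String) (hPre : Pre_get_ans_1 data) {p q r : Nat}
    (hp : p < (pvNodes data).length) (hq : q < (pvNodes data).length)
    (hr : r < (pvNodes data).length) :
    pvFull (pvAdjB data) (pvNodes data) (pvTNodes data) ((p : Int), (q : Int), (r : Int)) = true ↔
      (pvE data ((pvNodes data)[p]) ((pvNodes data)[q]) ∧
       pvE data ((pvNodes data)[p]) ((pvNodes data)[r]) ∧
       pvE data ((pvNodes data)[q]) ((pvNodes data)[r]) ∧
       (pvIsT ((pvNodes data)[p]) = true ∨ pvIsT ((pvNodes data)[q]) = true ∨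
        pvIsT ((pvNodes data)[r]) = true)) := by
  have e1 := pyGetD_at (pvNodes data) (i := (p : Int)) (Int.natCast_nonneg _) (by exact_mod_cast hp)
  have e2 := pyGetD_at (pvNodes data) (i := (q : Int)) (Int.natCast_nonneg _) (by exact_mod_cast hq)
  have e3 := pyGetD_at (pvNodes data) (i := (r : Int)) (Int.natCast_nonneg _) (by exact_mod_cast hr)
  simp only [Int.toNat_natCast] at e1 e2 e3
  have tcont : ∀ {m : Nat} (hm : m < (pvNodes data).length),
      ((PySem.Set.contains (pvTNodes data) ((pvNodes data)[m]) = true) ↔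
        pvIsT ((pvNodes data)[m]) = true) := by
    intro m hm
    rw [PySem.Set.contains_iff, pvTNodes, PySem.Set.mem_ofList, List.mem_filter]
    simp [List.getElem_mem]
  unfold pvFull pvGuard pvCond
  simp only [e1, e2, e3, Bool.and_eq_true, Bool.or_eq_true]
  rw [tcont hp, tcont hq, tcont hr,
    PySem.Set.contains_iff, PySem.Set.contains_iff, PySem.Set.contains_iff,
    adjB_mem data hPre, adjB_mem data hPre, adjB_mem data hPre]
  simp only [and_assoc, or_assoc]

lemma TL_mem (data : String) (t : List String) :
    t ∈ ((pvIDX ((pvNodes data).length : Int)).filter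
          (pvFull (pvAdjB data) (pvNodes data) (pvTNodes data))).map (pvTriple (pvNodes data)) ↔
      ∃ (p q r : Nat) (hp : p < (pvNodes data).length) (hq : q < (pvNodes data).length)
        (hr : r < (pvNodes data).length), p ≤ q ∧ q ≤ r ∧
        pvFull (pvAdjB data) (pvNodes data) (pvTNodes data) ((p : Int), (q : Int), (r : Int)) = true ∧
        t = [(pvNodes data)[p], (pvNodes data)[q], (pvNodes data)[r]] := by
  rw [List.mem_map]
  constructor
  · rintro ⟨⟨i, j, k⟩, hm, rfl⟩
    rw [List.mem_filter] at hm
    obtain ⟨hidx, hfull⟩ := hm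
    obtain ⟨h0, h1, h2, h3⟩ := (mem_pvIDX _ _).1 hidx
    simp only at h0 h1 h2 h3
    refine ⟨i.toNat, j.toNat, k.toNat, by omega, by omega, by omega, by omega, by omega, ?_, ?_⟩
    · rw [show ((i.toNat : Int), (j.toNat : Int), (k.toNat : Int)) = (i, j, k) by
        simp [Prod.ext_iff]; omega]
      exact hfull
    · unfold pvTriple
      simp only
      rw [pyGetD_at _ h0 (by omega), pyGetD_at _ (by omega) (by omega),
        pyGetD_at _ (by omega) h3]
  · rintro ⟨p, q, r, hp, hq, hr, hpq, hqr, hfull, rfl⟩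
    refine ⟨((p : Int), (q : Int), (r : Int)), ?_, ?_⟩
    · rw [List.mem_filter]
      refine ⟨(mem_pvIDX _ _).2 ?_, hfull⟩
      refine ⟨Int.natCast_nonneg _, ?_, ?_, ?_⟩ <;> simp only [] <;> [exact_mod_cast hpq; exact_mod_cast hqr; exact_mod_cast hr]
    · unfold pvTriple
      simp only
      rw [pyGetD_at _ (Int.natCast_nonneg _) (by exact_mod_cast hp),
        pyGetD_at _ (Int.natCast_nonneg _) (by exact_mod_cast hq),
        pyGetD_at _ (Int.natCast_nonneg _) (by exact_mod_cast hr)]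
      simp

lemma TL_nodup (data : String) :
    (((pvIDX ((pvNodes data).length : Int)).filter
      (pvFull (pvAdjB data) (pvNodes data) (pvTNodes data))).map (pvTriple (pvNodes data))).Nodup := by
  refine List.Nodup.map_on ?_ ((nodup_pvIDX _).filter _)
  rintro ⟨i, j, k⟩ hm ⟨i', j', k'⟩ hm' heq
  have hb := (mem_pvIDX _ _).1 (List.mem_of_mem_filter hm)
  have hb' := (mem_pvIDX _ _).1 (List.mem_of_mem_filter hm')
  simp only at hb hb'
  obtain ⟨h0, h1, h2, h3⟩ := hb
  obtain ⟨h0', h1', h2', h3'⟩ := hb'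
  unfold pvTriple at heq
  simp only at heq
  rw [pyGetD_at _ h0 (by omega), pyGetD_at _ (by omega : (0:Int) ≤ j) (by omega),
    pyGetD_at _ (by omega : (0:Int) ≤ k) h3,
    pyGetD_at _ h0' (by omega), pyGetD_at _ (by omega : (0:Int) ≤ j') (by omega),
    pyGetD_at _ (by omega : (0:Int) ≤ k') h3'] at heq
  obtain ⟨e1, e2, e3, -⟩ := List.cons_eq_cons.mp heq |>.imp id
    (fun h => List.cons_eq_cons.mp h |>.imp id (fun h => List.cons_eq_cons.mp h))
  have n1 := ((nodes_nodup data).getElem_inj_iff).1 e1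
  have n2 := ((nodes_nodup data).getElem_inj_iff).1 e2
  have n3 := ((nodes_nodup data).getElem_inj_iff).1 e3
  simp only [Prod.ext_iff]
  omega

lemma TL_iff_predA (data : String) (hPre : Pre_get_ans_1 data) (t : List String) :
    t ∈ ((pvIDX ((pvNodes data).length : Int)).filter
          (pvFull (pvAdjB data) (pvNodes data) (pvTNodes data))).map (pvTriple (pvNodes data)) ↔
      pvPredA data t := by
  rw [TL_mem data]
  constructor
  · rintro ⟨p, q, r, hp, hq, hr, hpq, hqr, hfull, rfl⟩
    obtain ⟨h1, h2, h3, h4⟩ := (full_iff data hPre hp hq hr).1 hfull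
    have hxy := getElem_mono _ (nodes_lt data) hp hq hpq
    have hyz := getElem_mono _ (nodes_lt data) hq hr hqr
    rcases h4 with ht | ht | ht
    · exact ⟨_, _, _, ht, h1, h3, h2,
        (PySem.List.sorted_id_eq_of_perm_of_pairwise _ _ (List.Perm.refl _)
          (by simp [String.le_iff_toList_le.mp hxy, String.le_iff_toList_le.mp hyz, String.le_iff_toList_le.mp (le_trans hxy hyz)])).symm⟩
    · exact ⟨_, _, _, ht, (pvE_symm data _ _).1 h1, h2, h3,
        (PySem.List.sorted_id_eq_of_perm_of_pairwise _ _
          (List.Perm.swap ((pvNodes data)[q]) ((pvNodes data)[p]) _)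
          (by simp [String.le_iff_toList_le.mp hxy, String.le_iff_toList_le.mp hyz, String.le_iff_toList_le.mp (le_trans hxy hyz)])).symm⟩
    · exact ⟨_, _, _, ht, (pvE_symm data _ _).1 h2, h1, (pvE_symm data _ _).1 h3,
        (PySem.List.sorted_id_eq_of_perm_of_pairwise _ _
          ((List.Perm.cons _ (List.Perm.swap ((pvNodes data)[r]) ((pvNodes data)[q]) [])).trans
            (List.Perm.swap ((pvNodes data)[r]) ((pvNodes data)[p]) _))
          (by simp [String.le_iff_toList_le.mp hxy, String.le_iff_toList_le.mp hyz, String.le_iff_toList_le.mp (le_trans hxy hyz)])).symm⟩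
  · rintro ⟨a, b, c, ht, hab, hbc, hac, rfl⟩
    have hlen : (PySem.List.sorted [a, b, c] (fun x => x)).length = 3 := by
      rw [PySem.List.length_sorted]; rfl
    obtain ⟨x, y, z, heq⟩ := List.length_eq_three.1 hlen
    have hperm : ([x, y, z] : List String).Perm [a, b, c] := by
      rw [← heq]; exact PySem.List.sorted_perm _ _ _
    have hle : List.Pairwise (· ≤ ·) [x, y, z] := by
      rw [← heq]; exact PySem.List.sorted_pairwise _ _
    have hxy : x ≤ y := List.rel_of_pairwise_cons hle (by simp)
    have hxz : x ≤ z := List.rel_of_pairwise_cons hle (by simp)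
    have hyz : y ≤ z := List.rel_of_pairwise_cons (List.pairwise_cons.1 hle).2 (by simp)
    have hE : List.Pairwise (pvE data) [x, y, z] := by
      refine List.Pairwise.perm ?_ hperm.symm (fun h => (pvE_symm data _ _).1 h)
      simp only [List.pairwise_cons, List.mem_cons, List.not_mem_nil]
      refine ⟨fun w hw => ?_, fun w hw => ?_, by simp⟩
      · rcases hw with rfl | rfl | h
        · exact hab
        · exact hac
        · simp at h
      · rcases hw with rfl | h
        · exact hbc
        · simp at h
    have hExy : pvE data x y := List.rel_of_pairwise_cons hE (by simp)
    have hExz : pvE data x z := List.rel_of_pairwise_cons hE (by simp)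
    have hEyz : pvE data y z := List.rel_of_pairwise_cons (List.pairwise_cons.1 hE).2 (by simp)
    have haMem : a = x ∨ a = y ∨ a = z := by
      simpa using hperm.mem_iff.2 (show a ∈ [a, b, c] by simp)
    obtain ⟨p, hp, hxp⟩ := List.getElem_of_mem ((nodes_mem data hPre x).2 ⟨y, hExy⟩)
    obtain ⟨q, hq, hyq⟩ := List.getElem_of_mem ((nodes_mem data hPre y).2 ⟨x, (pvE_symm data _ _).1 hExy⟩)
    obtain ⟨r, hr, hzr⟩ := List.getElem_of_mem ((nodes_mem data hPre z).2 ⟨x, (pvE_symm data _ _).1 hExz⟩)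
    refine ⟨p, q, r, hp, hq, hr,
      idx_le _ (nodes_lt data) hp hq (by rw [hxp, hyq]; exact hxy),
      idx_le _ (nodes_lt data) hq hr (by rw [hyq, hzr]; exact hyz), ?_, ?_⟩
    · refine (full_iff data hPre hp hq hr).2 ?_
      rw [hxp, hyq, hzr]
      refine ⟨hExy, hExz, hEyz, ?_⟩
      rcases haMem with rfl | rfl | rfl
      · exact .inl ht
      · exact .inr (.inl ht)
      · exact .inr (.inr ht)
    · rw [heq, hxp, hyq, hzr]

-- ===== VERDICT (by name: the statement is the Claim_ definition above) =====
theorem get_ans_1_spec : Claim_equal_get_ans_1 := by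
  unfold Claim_equal_get_ans_1
  intro data _hDom hPre
  unfold Spec_get_ans_1
  rw [get_ans_1_eq, get_ans_1_alt_eq]
  have hperm : (pvThree data).Perm
      (((pvIDX ((pvNodes data).length : Int)).filter
        (pvFull (pvAdjB data) (pvNodes data) (pvTNodes data))).map (pvTriple (pvNodes data))) :=
    (List.perm_ext_iff_of_nodup (threeSets_nodup data) (TL_nodup data)).2
      (fun t => (threeSets_mem data hPre t).trans (TL_iff_predA data hPre t).symm)
  have hl := hperm.length_eq
  rw [List.length_map] at hl
  exact_mod_cast hl
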